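-- pv_equiv track=rewrite | github.com/fagan2888/Coding-Interview | Python/Data Structure/Hash Table/Lonely Pixel II.py | findBlackPixel
-- ===== SOURCE A (Python) =====
-- import collections
--
-- def findBlackPixel(picture, N):
--     """
--     :type picture: List[List[str]]
--     :type N: int
--     :rtype: int
--     """
--     w, h = len(picture), len(picture[0])
--     rows, cols = [0] * w, [0] * h
--     for x in range(w):
--         for y in range(h):
--             if picture[x][y] == 'B':
--                 rows[x] += 1
--                 cols[y] += 1
--
--     sdict = collections.defaultdict(int)
--     for idx, row in enumerate(picture):
--         sdict[''.join(row)] += 1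
--
--     ans = 0
--     for x in range(w):
--         row = ''.join(picture[x])
--         if sdict[row] != N:
--             continue
--         for y in range(h):
--             if picture[x][y] == 'B':
--                 if rows[x] == N:
--                     if cols[y] == N:
--                         ans += 1
--     return ans
-- ===== SOURCE B (Python) =====
-- def findBlackPixel(picture, N):
--     h = len(picture[0])
--     groups = {}
--     for row in picture:
--         groups.setdefault(''.join(row), []).append(row)
--     ans = 0
--     for members in groups.values():
--         if len(members) != N:
--             continue
--         for row in members:
--             blacks = [y for y in range(h) if row[y] == 'B']
--             if len(blacks) != N:
--                 continue
--             for y in blacks: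
--                 if sum(r[y] == 'B' for r in picture) == N:
--                     ans += 1
--     return ans
-- ===== Notes on version B (the rewrite author's own statement) =====
-- stated objective: alternative
-- what changed: B replaces A's precomputed rows[]/cols[] count arrays, defaultdict of join counts and third full pass over all rows by one group-by pass (rows bucketed into lists by joined signature) followed by a loop over the groups that prunes by group size first, collects each member row's black indices once, and verifies each candidate column by a direct on-demand column scan; Pre_ excludes only the inputs where A raises IndexError (empty picture or a row shorter than the first).
import Mathlib
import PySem

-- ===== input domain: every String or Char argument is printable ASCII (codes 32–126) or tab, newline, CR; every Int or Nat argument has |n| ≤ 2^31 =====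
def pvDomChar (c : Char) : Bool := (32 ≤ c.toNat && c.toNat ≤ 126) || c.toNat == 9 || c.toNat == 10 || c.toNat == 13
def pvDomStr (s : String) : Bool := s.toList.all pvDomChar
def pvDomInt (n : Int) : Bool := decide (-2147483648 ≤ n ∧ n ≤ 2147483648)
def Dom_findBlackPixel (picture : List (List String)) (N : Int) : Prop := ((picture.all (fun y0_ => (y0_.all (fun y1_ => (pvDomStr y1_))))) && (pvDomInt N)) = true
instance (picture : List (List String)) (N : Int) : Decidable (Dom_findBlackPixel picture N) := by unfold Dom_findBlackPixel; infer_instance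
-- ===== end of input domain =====

-- B replaces A's precomputed rows[]/cols[] arrays, defaultdict and third full pass by one
-- group-by pass (rows bucketed by joined signature) and a loop over the groups, pruning by
-- group size first and verifying each candidate black pixel's column by a direct column scan
-- (objective: alternative algorithm, no precomputed count arrays; similar cost).

-- ===== PORT A =====
-- ''.join(row)
def pvJoin (row : List String) : String := PySem.Str.join "" row

-- Literal port of A. Python raises IndexError on picture == [] (len(picture[0])) and when a
-- row is shorter than len(picture[0]); those inputs are outside Pre_ (the [] branch returns 0).
-- rows[x] / cols[y] are the B-counts A's first double loop accumulates, expressed as counts.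
def findBlackPixel (picture : List (List String)) (N : Int) : Int :=
  match picture with
  | [] => 0
  | r0 :: _ =>
    let w := picture.length
    let h := r0.length
    let rows : Nat → Int := fun x =>
      (((List.range h).filter (fun y => (picture.getD x []).getD y "" = "B")).length : Int)
    let cols : Nat → Int := fun y =>
      ((picture.filter (fun r => r.getD y "" = "B")).length : Int)
    let sdict : PySem.Dict String Int :=
      picture.foldl (fun d row => d.insert (pvJoin row) (d.getD (pvJoin row) 0 + 1))
        PySem.Dict.empty
    (List.range w).foldl (fun ans x =>
      if sdict.getD (pvJoin (picture.getD x [])) 0 ≠ N then ans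
      else ans + ((((List.range h).filter (fun y =>
        (picture.getD x []).getD y "" = "B" ∧ rows x = N ∧ cols y = N)).length : Nat) : Int)) 0

-- ===== PORT B =====
-- Port of B (Source B): groups.setdefault(''.join(row), []).append(row) is Dict.modify with an
-- append (d[k] = d.get(k, []) + [row], new keys at the end); then a loop over groups.values():
-- prune by len(members) != N, then per member row collect blacks = the black indices below the
-- grid width h, prune by len(blacks) != N, and count those y whose direct column scan
-- sum(r[y] == 'B' for r in picture) equals N.  Python raises IndexError on picture == []
-- (len(picture[0])); that input is outside Pre_ (the [] branch returns 0).
def findBlackPixel_alt (picture : List (List String)) (N : Int) : Int :=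
  match picture with
  | [] => 0
  | r0 :: _ =>
    let h := r0.length
    let groups : PySem.Dict String (List (List String)) :=
      picture.foldl (fun d row => d.modify (pvJoin row) [] (· ++ [row])) PySem.Dict.empty
    groups.values.foldl (fun ans members =>
      if (members.length : Int) ≠ N then ans
      else members.foldl (fun ans row =>
        let blacks := (List.range h).filter (fun y => row.getD y "" = "B")
        if (blacks.length : Int) ≠ N then ans
        else blacks.foldl (fun ans y =>
          if ((picture.filter (fun r => r.getD y "" = "B")).length : Int) = N
          then ans + 1 else ans) ans) ans) 0

-- ===== PRECONDITION & SPEC =====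
-- Pre_ excludes exactly the inputs where Python A raises IndexError: the empty picture
-- (picture[0]) and pictures with a row shorter than the first row (picture[x][y]).
def Pre_findBlackPixel (picture : List (List String)) (N : Int) : Prop :=
  picture ≠ [] ∧ ∀ r ∈ picture, (picture.headD []).length ≤ r.length
instance (picture : List (List String)) (N : Int) : Decidable (Pre_findBlackPixel picture N) := by
  unfold Pre_findBlackPixel; infer_instance
def pvWitness_findBlackPixel : List (List String) × Int := ([["B", "W"], ["W", "B"]], 1)

def Spec_findBlackPixel (picture : List (List String)) (N : Int) (out : Int) : Prop := out = findBlackPixel_alt picture N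
instance (picture : List (List String)) (N : Int) (out : Int) : Decidable (Spec_findBlackPixel picture N out) := by unfold Spec_findBlackPixel; infer_instance

-- ===== CLAIM (what is proved, stated in full; the proofs are below) =====
def Claim_equal_findBlackPixel : Prop := ∀ (picture : List (List String)) (N : Int), Dom_findBlackPixel picture N → Pre_findBlackPixel picture N → Spec_findBlackPixel picture N (findBlackPixel picture N)

-- ===== LEMMAS AND PROOFS =====

-- per-row contribution as A computes it (indices below h)
def gRow (p : List (List String)) (h : Nat) (N : Int) (row : List String) : Int :=
  if ((p.map pvJoin).count (pvJoin row) : Int) ≠ N then 0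
  else if (((List.range h).filter (fun y => row.getD y "" = "B")).length : Int) ≠ N then 0
  else ((((List.range h).filter (fun y => row.getD y "" = "B")).filter
      (fun y => ((p.filter (fun r => r.getD y "" = "B")).length : Int) = N)).length : Int)

theorem pv_map_getD_range {α : Type} (l : List α) (d : α) :
    (List.range l.length).map (fun i => l.getD i d) = l := by
  apply List.ext_getElem
  · simp
  · intro i h1 h2
    simp [List.getD_eq_getElem?_getD, List.getElem?_eq_getElem h2]

theorem pv_foldl_range_getD {α β : Type} (l : List α) (d : α) (G : β → α → β) (init : β) :
    (List.range l.length).foldl (fun a i => G a (l.getD i d)) init = l.foldl G init := by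
  conv_rhs => rw [← pv_map_getD_range l d]
  rw [List.foldl_map]

theorem pv_A_step (p : List (List String)) (h : Nat) (N : Int) (row : List String) (acc : Int) :
    (if ((p.map pvJoin).count (pvJoin row) : Int) ≠ N then acc
     else acc + (((List.range h).filter (fun y =>
        row.getD y "" = "B" ∧
        ((((List.range h).filter (fun y' => row.getD y' "" = "B")).length : Nat) : Int) = N ∧
        ((p.filter (fun r => r.getD y "" = "B")).length : Int) = N)).length : Int))
    = acc + gRow p h N row := by
  unfold gRow
  by_cases h1 : ((p.map pvJoin).count (pvJoin row) : Int) = N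
  · simp only [h1, ne_eq, not_true_eq_false, if_false, ite_not]
    by_cases h2 : (((List.range h).filter (fun y => row.getD y "" = "B")).length : Int) = N
    · rw [if_pos h2]
      congr 2
      rw [List.filter_filter]
      apply congrArg List.length
      apply List.filter_congr
      intro y _
      simp only [List.getD_eq_getElem?_getD] at h2
      simp [h2, Bool.and_comm]
    · have hnil : (List.range h).filter (fun y =>
          decide (row.getD y "" = "B" ∧
            ((((List.range h).filter (fun y' => row.getD y' "" = "B")).length : Nat) : Int) = N ∧
            ((p.filter (fun r => r.getD y "" = "B")).length : Int) = N)) = [] := by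
        apply List.filter_eq_nil_iff.mpr
        intro y _
        simp only [decide_eq_true_eq]
        rintro ⟨-, hc, -⟩
        exact h2 hc
      rw [hnil, if_neg h2]
      simp
  · simp [h1]

theorem pv_A_eq (r0 : List String) (rest : List (List String)) (N : Int) :
    findBlackPixel (r0 :: rest) N
      = (((r0 :: rest).map (gRow (r0 :: rest) r0.length N))).sum := by
  have hsd : ((r0 :: rest).foldl
      (fun d row => d.insert (pvJoin row) (d.getD (pvJoin row) 0 + 1)) PySem.Dict.empty)
      = PySem.Dict.counter ((r0 :: rest).map pvJoin) := by
    rw [← PySem.Dict.foldl_insert_getD_add_one_eq_counter, List.foldl_map]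
  have hF := pv_foldl_range_getD (r0 :: rest) []
    (fun acc row =>
      if (PySem.Dict.counter ((r0 :: rest).map pvJoin)).getD (pvJoin row) 0 ≠ N then acc
      else acc + (((List.range r0.length).filter (fun y =>
        row.getD y "" = "B" ∧
        ((((List.range r0.length).filter (fun y' => row.getD y' "" = "B")).length : Nat) : Int) = N ∧
        (((r0 :: rest).filter (fun r => r.getD y "" = "B")).length : Int) = N)).length : Int)) 0
  show (List.range (r0 :: rest).length).foldl _ 0 = _
  rw [hsd]
  rw [hF]
  rw [PySem.List.foldl_congr_mem' _ _ (fun acc row => acc + gRow (r0 :: rest) r0.length N row) 0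
    (fun row _ acc => by
      show _ = acc + gRow (r0 :: rest) r0.length N row
      rw [PySem.Dict.getD_counter]
      exact pv_A_step (r0 :: rest) r0.length N row acc)]
  rw [PySem.List.foldl_add, zero_add]

-- B's dict is the group-by of the picture rows keyed by their join
theorem pv_group_getD (p : List (List String)) (k : String) :
    (p.foldl (fun d row => d.modify (pvJoin row) [] (· ++ [row])) PySem.Dict.empty).getD k []
      = p.filter (fun r => pvJoin r == k) := by
  have hmap : p.foldl (fun d row => d.modify (pvJoin row) [] (· ++ [row])) PySem.Dict.empty
      = (p.map (fun r => (pvJoin r, r))).foldl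
          (fun d q => d.modify q.1 [] (· ++ [q.2])) PySem.Dict.empty := by
    rw [List.foldl_map]
  rw [hmap, PySem.Dict.getD_foldl_modify_append]
  rw [List.filter_map, List.map_map]
  simp [Function.comp_def]

theorem pv_sum_single (K : List String) (hnd : K.Nodup) (c : String) (hc : c ∈ K) (v : Int) :
    (K.map (fun k => if c = k then v else 0)).sum = v := by
  induction K with
  | nil => cases hc
  | cons k K' ih =>
    rcases List.mem_cons.mp hc with h | h
    · subst h
      have hz : (K'.map (fun k => if c = k then v else 0)).sum = 0 := by
      
        have : K'.map (fun k => if c = k then v else 0) = K'.map (fun _ => (0 : Int)) := by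
          apply List.map_congr_left
          intro x hx
          have : c ≠ x := by
            intro he; exact (List.nodup_cons.mp hnd).1 (he ▸ hx)
          simp [this]
        simp [this]
      simp [hz]
    · have hck : c ≠ k := by
        intro he; subst he; exact (List.nodup_cons.mp hnd).1 h
      simp [hck, ih (List.nodup_cons.mp hnd).2 h]

theorem pv_partition (l : List (List String)) (g : List String → Int) (K : List String)
    (hnd : K.Nodup) (hcov : ∀ r ∈ l, pvJoin r ∈ K) :
    (K.map (fun k => ((l.filter (fun r => pvJoin r == k)).map g).sum)).sum = (l.map g).sum := by
  induction l with
  | nil => simp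
  | cons a t ih =>
    have hsplit : ∀ k, (((a :: t).filter (fun r => pvJoin r == k)).map g).sum
        = (if pvJoin a = k then g a else 0)
          + ((t.filter (fun r => pvJoin r == k)).map g).sum := by
      intro k
      by_cases h : pvJoin a = k
      · simp [h]
      · simp [h]
    calc (K.map (fun k => (((a :: t).filter (fun r => pvJoin r == k)).map g).sum)).sum
        = (K.map (fun k => (if pvJoin a = k then g a else 0)
            + ((t.filter (fun r => pvJoin r == k)).map g).sum)).sum := by
          apply congrArg; apply List.map_congr_left; intro k _; exact hsplit k
      _ = (K.map (fun k => if pvJoin a = k then g a else 0)).sum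
            + (K.map (fun k => ((t.filter (fun r => pvJoin r == k)).map g).sum)).sum := by
          rw [PySem.List.sum_map_add_int]
      _ = g a + ((t.map g)).sum := by
          rw [pv_sum_single K hnd (pvJoin a) (hcov a (List.mem_cons_self)) (g a)]
          rw [ih (fun r hr => hcov r (List.mem_cons_of_mem a hr))]
      _ = ((a :: t).map g).sum := by simp

-- B = sum of the per-row contributions over the picture rows
theorem pv_B_eq (r0 : List String) (rest : List (List String)) (N : Int) :
    findBlackPixel_alt (r0 :: rest) N
      = ((r0 :: rest).map (gRow (r0 :: rest) r0.length N)).sum := by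
  have hdef : findBlackPixel_alt (r0 :: rest) N
      = ((r0 :: rest).foldl (fun d row => d.modify (pvJoin row) [] (· ++ [row]))
          PySem.Dict.empty).values.foldl (fun ans members =>
        if (members.length : Int) ≠ N then ans
        else members.foldl (fun ans row =>
          if ((((List.range r0.length).filter (fun y => row.getD y "" = "B")).length : Nat) : Int)
              ≠ N then ans
          else ((List.range r0.length).filter (fun y => row.getD y "" = "B")).foldl (fun ans y =>
            if (((r0 :: rest).filter (fun r => r.getD y "" = "B")).length : Int) = N
            then ans + 1 else ans) ans) ans) 0 := rfl
  rw [hdef]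
  set p := r0 :: rest with hp
  set G := p.foldl (fun d row => d.modify (pvJoin row) [] (· ++ [row])) PySem.Dict.empty with hG
  have hnd : G.keys.Nodup := by
    rw [hG]
    exact PySem.Dict.nodup_keys_foldl_modify_key p pvJoin [] (fun _ row v => v ++ [row])
      PySem.Dict.empty (by simp [PySem.Dict.empty])
  have hkeys : G.keys = PySem.Set.ofList (p.map pvJoin) := by
    rw [hG]
    rw [PySem.Dict.keys_foldl_modify_key p pvJoin [] (fun _ row v => v ++ [row]) PySem.Dict.empty]
    simp [PySem.Set.update, PySem.Set.ofList_eq_foldl, PySem.Dict.empty]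
  have hvals : G.values = G.keys.map (fun k => p.filter (fun r => pvJoin r == k)) := by
    rw [PySem.Dict.values_eq_map_keys G hnd []]
    apply List.map_congr_left
    intro k _
    rw [hG, pv_group_getD]
  rw [hvals, List.foldl_map]
  -- inner loops to sums
  have hstep : ∀ k ∈ G.keys, ∀ ans : Int,
      (fun (ans : Int) members =>
        if (members.length : Int) ≠ N then ans
        else members.foldl (fun ans row =>
          if ((((List.range r0.length).filter (fun y => row.getD y "" = "B")).length : Nat) : Int)
              ≠ N then ans
          else ((List.range r0.length).filter (fun y => row.getD y "" = "B")).foldl (fun ans y =>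
            if ((p.filter (fun r => r.getD y "" = "B")).length : Int) = N
            then ans + 1 else ans) ans) ans) ans (p.filter (fun r => pvJoin r == k))
      = ans + ((p.filter (fun r => pvJoin r == k)).map (gRow p r0.length N)).sum := by
    intro k _ ans
    simp only []
    set members := p.filter (fun r => pvJoin r == k) with hm
    have hjn : ∀ r ∈ members, pvJoin r = k := by
      intro r hr
      have := List.of_mem_filter hr
      simpa using this
    have hcnt : ((members.length : Nat) : Int) = ((p.map pvJoin).count k : Int) := by
      congr 1
      rw [hm, List.count, List.countP_map, ← List.countP_eq_length_filter]
      rfl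
    have hinner : ∀ a : Int, members.foldl (fun ans row =>
          if ((((List.range r0.length).filter (fun y => row.getD y "" = "B")).length : Nat) : Int)
              ≠ N then ans
          else ((List.range r0.length).filter (fun y => row.getD y "" = "B")).foldl (fun ans y =>
            if ((p.filter (fun r => r.getD y "" = "B")).length : Int) = N
            then ans + 1 else ans) ans) a
        = a + (members.map (fun row =>
            if ((((List.range r0.length).filter (fun y => row.getD y "" = "B")).length : Nat) : Int)
                ≠ N then 0
            else (((((List.range r0.length).filter (fun y => row.getD y "" = "B")).filter
              (fun y => ((p.filter (fun r => r.getD y "" = "B")).length : Int) = N)).length : Nat)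
                : Int))).sum := by
      intro a
      rw [PySem.List.foldl_congr_mem' _ _ (fun ans row => ans +
          (if ((((List.range r0.length).filter (fun y => row.getD y "" = "B")).length : Nat) : Int)
              ≠ N then 0
           else (((((List.range r0.length).filter (fun y => row.getD y "" = "B")).filter
             (fun y => ((p.filter (fun r => r.getD y "" = "B")).length : Int) = N)).length : Nat)
               : Int))) a
        (fun row _ ans => by
          by_cases hc : ((((List.range r0.length).filter
              (fun y => row.getD y "" = "B")).length : Nat) : Int) = N
          · simp only [hc, ne_eq, not_true_eq_false, if_false]
            rw [PySem.List.foldl_ite_add_one]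
            rw [List.countP_eq_length_filter]
          · rw [if_pos hc]
            simp only [List.getD_eq_getElem?_getD] at hc
            simp [hc])]
      rw [PySem.List.foldl_add]
    by_cases hlen : ((members.length : Nat) : Int) = N
    · rw [if_neg (by exact fun h => h hlen), hinner]
      congr 1
      apply congrArg
      apply List.map_congr_left
      intro row hrow
      unfold gRow
      rw [hjn row hrow, ← hcnt]
      simp [hlen]
    · rw [if_pos hlen]
      have : members.map (gRow p r0.length N) = members.map (fun _ => (0 : Int)) := by
        apply List.map_congr_left
        intro row hrow
        unfold gRow
        rw [hjn row hrow, ← hcnt, if_pos hlen]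
      simp [this]
  rw [PySem.List.foldl_congr_mem' _ _
    (fun ans k => ans + ((p.filter (fun r => pvJoin r == k)).map (gRow p r0.length N)).sum) 0
    (fun k hk ans => hstep k hk ans)]
  rw [PySem.List.foldl_add, zero_add]
  rw [hkeys]
  apply pv_partition p (gRow p r0.length N) _ (PySem.Set.nodup_ofList _)
  intro r hr
  rw [PySem.Set.mem_ofList]
  exact List.mem_map_of_mem hr

theorem pv_main (picture : List (List String)) (N : Int)
    (hpre : Pre_findBlackPixel picture N) :
    findBlackPixel picture N = findBlackPixel_alt picture N := by
  obtain ⟨hne, -⟩ := hpre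
  match picture with
  | [] => exact absurd rfl hne
  | r0 :: rest => rw [pv_A_eq, pv_B_eq]

-- ===== VERDICT (by name: the statement is the Claim_ definition above) =====
theorem findBlackPixel_spec : Claim_equal_findBlackPixel := by
  intro picture N _ hpre
  unfold Spec_findBlackPixel
  exact pv_main picture N hpre
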